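-- pv_equiv track=rewrite | github.com/AlbertAinstine578/CLL798---Individual-Project | run_analysis.py | build_nb4
-- ===== SOURCE A (Python) =====
-- def build_nb4(N):
--     nb = {}
--     for i in range(N):
--         for j in range(N):
--             lst = []
--             for di, dj in [(-1,0),(1,0),(0,-1),(0,1)]:
--                 ni, nj = i+di, j+dj
--                 if 0 <= ni < N and 0 <= nj < N:
--                     lst.append((ni, nj))
--             nb[(i,j)] = lst
--     return nb
-- ===== SOURCE B (Python) =====
-- def build_nb4(N):
--     nb = {}
--     for i in range(N):
--         for j in range(N):
--             nb[(i, j)] = []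
--     for i in range(N):
--         for j in range(N):
--             if i + 1 < N:
--                 nb[(i, j)].append((i + 1, j))
--                 nb[(i + 1, j)].append((i, j))
--     for i in range(N):
--         for j in range(N):
--             if j + 1 < N:
--                 nb[(i, j)].append((i, j + 1))
--                 nb[(i, j + 1)].append((i, j))
--     return nb
-- ===== Notes on version B (the rewrite author's own statement) =====
-- stated objective: alternative
-- what changed: B enumerates grid edges in two directional passes (vertical then horizontal), appending both endpoints to each other's list, instead of scanning every candidate neighbor of every cell with bounds checks.
import Mathlib
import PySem

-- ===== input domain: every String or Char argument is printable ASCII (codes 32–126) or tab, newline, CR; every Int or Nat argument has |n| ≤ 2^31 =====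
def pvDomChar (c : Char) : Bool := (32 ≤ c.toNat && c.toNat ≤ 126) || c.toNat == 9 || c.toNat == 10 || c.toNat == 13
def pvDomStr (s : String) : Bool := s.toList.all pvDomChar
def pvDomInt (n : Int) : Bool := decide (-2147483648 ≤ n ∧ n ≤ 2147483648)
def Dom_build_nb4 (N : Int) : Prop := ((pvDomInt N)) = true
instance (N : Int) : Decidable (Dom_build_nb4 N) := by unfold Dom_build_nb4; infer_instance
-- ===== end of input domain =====

-- B builds the adjacency lists by enumerating grid edges in a vertical then a horizontal pass,
-- instead of A's per-cell scan over the 4 candidate directions (objective: alternative).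

-- ===== PORT A =====
def build_nb4 (N : Int) : List (Int × Int × List (Int × Int)) :=
  let nb : PySem.Dict (Int × Int) (List (Int × Int)) :=
    (PySem.List.pyRange 0 N 1).foldl (fun nb i =>
      (PySem.List.pyRange 0 N 1).foldl (fun nb j =>
        let lst := [((-1 : Int), (0 : Int)), (1, 0), (0, -1), (0, 1)].foldl (fun lst d =>
          let ni := i + d.1
          let nj := j + d.2
          if 0 ≤ ni ∧ ni < N ∧ 0 ≤ nj ∧ nj < N then lst ++ [(ni, nj)] else lst) []
        nb.insert (i, j) lst) nb) PySem.Dict.empty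
  nb.items.map (fun p => (p.1.1, p.1.2, p.2))

-- ===== PORT B =====
def build_nb4_alt (N : Int) : List (Int × Int × List (Int × Int)) :=
  let nb : PySem.Dict (Int × Int) (List (Int × Int)) :=
    (PySem.List.pyRange 0 N 1).foldl (fun nb i =>
      (PySem.List.pyRange 0 N 1).foldl (fun nb j =>
        nb.insert (i, j) []) nb) PySem.Dict.empty
  let nb :=
    (PySem.List.pyRange 0 N 1).foldl (fun nb i =>
      (PySem.List.pyRange 0 N 1).foldl (fun nb j =>
        if i + 1 < N then
          ((nb.modify (i, j) [] (· ++ [(i + 1, j)])).modify (i + 1, j) [] (· ++ [(i, j)]))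
        else nb) nb) nb
  let nb :=
    (PySem.List.pyRange 0 N 1).foldl (fun nb i =>
      (PySem.List.pyRange 0 N 1).foldl (fun nb j =>
        if j + 1 < N then
          ((nb.modify (i, j) [] (· ++ [(i, j + 1)])).modify (i, j + 1) [] (· ++ [(i, j)]))
        else nb) nb) nb
  nb.items.map (fun p => (p.1.1, p.1.2, p.2))

-- ===== PRECONDITION & SPEC =====
def Spec_build_nb4 (N : Int) (out : List (Int × Int × List (Int × Int))) : Prop := out = build_nb4_alt N
instance (N : Int) (out : List (Int × Int × List (Int × Int))) : Decidable (Spec_build_nb4 N out) := by unfold Spec_build_nb4; infer_instance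

-- ===== CLAIM (what is proved, stated in full; the proofs are below) =====
def Claim_equal_build_nb4 : Prop := ∀ (N : Int), Dom_build_nb4 N → Spec_build_nb4 N (build_nb4 N)

-- ===== LEMMAS AND PROOFS =====

-- the row-major list of grid cells
def pvCells (N : Int) : List (Int × Int) :=
  (PySem.List.pyRange 0 N 1).flatMap (fun i => (PySem.List.pyRange 0 N 1).map (fun j => (i, j)))

-- A's per-cell neighbor list
def pvLstA (N i j : Int) : List (Int × Int) :=
  [((-1 : Int), (0 : Int)), (1, 0), (0, -1), (0, 1)].foldl (fun lst d =>
    let ni := i + d.1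
    let nj := j + d.2
    if 0 ≤ ni ∧ ni < N ∧ 0 ≤ nj ∧ nj < N then lst ++ [(ni, nj)] else lst) []

-- the vertical / horizontal edge contributions of one cell, and the edge lists
def pvVG (N : Int) (c : Int × Int) : List ((Int × Int) × (Int × Int)) :=
  if c.1 + 1 < N then [((c.1, c.2), (c.1 + 1, c.2)), ((c.1 + 1, c.2), (c.1, c.2))] else []
def pvHG (N : Int) (c : Int × Int) : List ((Int × Int) × (Int × Int)) :=
  if c.2 + 1 < N then [((c.1, c.2), (c.1, c.2 + 1)), ((c.1, c.2 + 1), (c.1, c.2))] else []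
def pvVE (N : Int) : List ((Int × Int) × (Int × Int)) := (pvCells N).flatMap (pvVG N)
def pvHE (N : Int) : List ((Int × Int) × (Int × Int)) := (pvCells N).flatMap (pvHG N)

-- intended vertical / horizontal neighbor sublists
def pvUD (N a b : Int) : List (Int × Int) :=
  (if 1 ≤ a then [(a - 1, b)] else []) ++ (if a + 1 < N then [(a + 1, b)] else [])
def pvLR (N a b : Int) : List (Int × Int) :=
  (if 1 ≤ b then [(a, b - 1)] else []) ++ (if b + 1 < N then [(a, b + 1)] else [])

-- the three stages of B's dict
def pvD1 (N : Int) : PySem.Dict (Int × Int) (List (Int × Int)) :=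
  (pvCells N).foldl (fun d c => d.insert c []) PySem.Dict.empty
def pvD2 (N : Int) : PySem.Dict (Int × Int) (List (Int × Int)) :=
  (pvVE N).foldl (fun d p => d.modify p.1 [] (fun x => x ++ [p.2])) (pvD1 N)
def pvD3 (N : Int) : PySem.Dict (Int × Int) (List (Int × Int)) :=
  (pvHE N).foldl (fun d p => d.modify p.1 [] (fun x => x ++ [p.2])) (pvD2 N)

lemma pv_foldl_flatMap {α β γ : Type} (L : List α) (g : α → List β) (f : γ → β → γ) (init : γ) :
    (L.flatMap g).foldl f init = L.foldl (fun acc a => (g a).foldl f acc) init := by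
  induction L generalizing init with
  | nil => rfl
  | cons x t ih => simp [List.flatMap_cons, List.foldl_append, ih]

lemma pv_cells_nodup (N : Int) : (pvCells N).Nodup := by
  have h : pvCells N = (PySem.List.pyRange 0 N 1) ×ˢ (PySem.List.pyRange 0 N 1) := rfl
  rw [h]
  exact List.Nodup.product (PySem.List.nodup_pyRange_one 0 N) (PySem.List.nodup_pyRange_one 0 N)

lemma pv_mem_cells {N : Int} {c : Int × Int} :
    c ∈ pvCells N ↔ (0 ≤ c.1 ∧ c.1 < N) ∧ (0 ≤ c.2 ∧ c.2 < N) := by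
  cases c with
  | mk a b =>
    simp [pvCells, List.mem_flatMap, PySem.List.mem_pyRange_one]

-- the fold over cells of a dict-step equals the nested row/column fold
lemma pv_cells_foldl {γ : Type} (N : Int) (f : γ → Int × Int → γ) (init : γ) :
    (pvCells N).foldl f init =
      (PySem.List.pyRange 0 N 1).foldl (fun acc i =>
        (PySem.List.pyRange 0 N 1).foldl (fun acc j => f acc (i, j)) acc) init := by
  rw [pvCells, pv_foldl_flatMap]
  simp only [List.foldl_map]

-- single support point in a range
lemma pv_flatMap_single {β : Type} (N : Int) (g : Int → List β) (t : Int)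
    (ht0 : 0 ≤ t) (htN : t < N)
    (hsupp : ∀ x, 0 ≤ x → x < N → x ≠ t → g x = []) :
    (PySem.List.pyRange 0 N 1).flatMap g = g t := by
  have hsplit : PySem.List.pyRange 0 N 1
      = PySem.List.pyRange 0 t 1 ++ t :: PySem.List.pyRange (t + 1) N 1 := by
    rw [PySem.List.pyRange_one_append 0 t N ht0 (le_of_lt htN), PySem.List.pyRange_one_cons htN]
  rw [hsplit, List.flatMap_append, List.flatMap_cons]
  have h1 : (PySem.List.pyRange 0 t 1).flatMap g = [] := by
    rw [List.flatMap_eq_nil_iff]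
    intro x hx
    rw [PySem.List.mem_pyRange_one] at hx
    exact hsupp x hx.1 (by omega) (by omega)
  have h2 : (PySem.List.pyRange (t + 1) N 1).flatMap g = [] := by
    rw [List.flatMap_eq_nil_iff]
    intro x hx
    rw [PySem.List.mem_pyRange_one] at hx
    exact hsupp x (by omega) hx.2 (by omega)
  simp [h1, h2]

-- two support points in a range
lemma pv_flatMap_double {β : Type} (N : Int) (g : Int → List β) (s t : Int)
    (hs0 : 0 ≤ s) (hst : s < t) (htN : t < N)
    (hsupp : ∀ x, 0 ≤ x → x < N → x ≠ s → x ≠ t → g x = []) :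
    (PySem.List.pyRange 0 N 1).flatMap g = g s ++ g t := by
  have hsplit : PySem.List.pyRange 0 N 1
      = PySem.List.pyRange 0 s 1 ++ s ::
        (PySem.List.pyRange (s + 1) t 1 ++ t :: PySem.List.pyRange (t + 1) N 1) := by
    rw [PySem.List.pyRange_one_append 0 s N hs0 (by omega),
        PySem.List.pyRange_one_cons (show s < N by omega),
        PySem.List.pyRange_one_append (s + 1) t N (by omega) (by omega),
        PySem.List.pyRange_one_cons htN]
  rw [hsplit]
  have h1 : (PySem.List.pyRange 0 s 1).flatMap g = [] := by
    rw [List.flatMap_eq_nil_iff]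
    intro x hx
    rw [PySem.List.mem_pyRange_one] at hx
    exact hsupp x hx.1 (by omega) (by omega) (by omega)
  have h2 : (PySem.List.pyRange (s + 1) t 1).flatMap g = [] := by
    rw [List.flatMap_eq_nil_iff]
    intro x hx
    rw [PySem.List.mem_pyRange_one] at hx
    exact hsupp x (by omega) (by omega) (by omega) (by omega)
  have h3 : (PySem.List.pyRange (t + 1) N 1).flatMap g = [] := by
    rw [List.flatMap_eq_nil_iff]
    intro x hx
    rw [PySem.List.mem_pyRange_one] at hx
    exact hsupp x (by omega) hx.2 (by omega) (by omega)
  simp [h1, h2, h3]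

-- A's neighbor scan produces exactly vertical-then-horizontal neighbors
lemma pv_lstA_eq (N a b : Int) (ha0 : 0 ≤ a) (haN : a < N) (hb0 : 0 ≤ b) (hbN : b < N) :
    pvLstA N a b = pvUD N a b ++ pvLR N a b := by
  unfold pvLstA pvUD pvLR
  simp only [List.foldl_cons, List.foldl_nil]
  have c1 : (0 ≤ a + -1 ∧ a + -1 < N ∧ 0 ≤ b + 0 ∧ b + 0 < N) ↔ 1 ≤ a := by
    constructor <;> intro h <;> [omega; exact ⟨by omega, by omega, by omega, by omega⟩]
  have c2 : (0 ≤ a + 1 ∧ a + 1 < N ∧ 0 ≤ b + 0 ∧ b + 0 < N) ↔ a + 1 < N := by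
    constructor <;> intro h <;> [omega; exact ⟨by omega, by omega, by omega, by omega⟩]
  have c3 : (0 ≤ a + 0 ∧ a + 0 < N ∧ 0 ≤ b + -1 ∧ b + -1 < N) ↔ 1 ≤ b := by
    constructor <;> intro h <;> [omega; exact ⟨by omega, by omega, by omega, by omega⟩]
  have c4 : (0 ≤ a + 0 ∧ a + 0 < N ∧ 0 ≤ b + 1 ∧ b + 1 < N) ↔ b + 1 < N := by
    constructor <;> intro h <;> [omega; exact ⟨by omega, by omega, by omega, by omega⟩]
  simp only [c1, c2, c3, c4, List.nil_append]
  have e1 : a + -1 = a - 1 := by ring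
  have e2 : b + -1 = b - 1 := by ring
  have e3 : a + 0 = a := by ring
  have e4 : b + 0 = b := by ring
  rw [e1, e2, e3, e4]
  split_ifs <;> simp

-- value appended to cell (a,b) by the vertical pass
lemma pv_VE_filter (N a b : Int) (ha0 : 0 ≤ a) (haN : a < N) (hb0 : 0 ≤ b) (hbN : b < N) :
    (((pvVE N).filter (fun p => p.1 == ((a, b) : Int × Int))).map (fun x => x.2)) = pvUD N a b := by
  have hcompute : ∀ i j : Int,
      (((pvVG N (i, j)).filter (fun p => p.1 == ((a, b) : Int × Int))).map (fun x => x.2)) =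
        (if i + 1 = a ∧ j = b ∧ a < N then [(a - 1, b)] else []) ++
        (if i = a ∧ j = b ∧ a + 1 < N then [(a + 1, b)] else []) := by
    intro i j
    simp only [pvVG]
    by_cases hiN : i + 1 < N
    · simp only [if_pos hiN, List.filter_cons, List.filter_nil, beq_iff_eq, Prod.mk.injEq]
      split_ifs <;> simp_all <;> omega
    · simp only [if_neg hiN]
      simp_all
      omega
  have hrow : ∀ i : Int, ((PySem.List.pyRange 0 N 1).flatMap
        (fun j => (((pvVG N (i, j)).filter (fun p => p.1 == ((a, b) : Int × Int))).map (fun x => x.2)))) =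
        (if i + 1 = a ∧ a < N then [(a - 1, b)] else []) ++
        (if i = a ∧ a + 1 < N then [(a + 1, b)] else []) := by
    intro i
    have := pv_flatMap_single N
      (fun j => (((pvVG N (i, j)).filter (fun p => p.1 == ((a, b) : Int × Int))).map (fun x => x.2)))
      b hb0 hbN (by intro x hx0 hxN hxb; simp only [hcompute]; simp [hxb])
    rw [this]
    simp only [hcompute]
    split_ifs <;> simp_all
  have hexp : (((pvVE N).filter (fun p => p.1 == ((a, b) : Int × Int))).map (fun x => x.2)) =
      (PySem.List.pyRange 0 N 1).flatMap (fun i => (PySem.List.pyRange 0 N 1).flatMap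
        (fun j => (((pvVG N (i, j)).filter (fun p => p.1 == ((a, b) : Int × Int))).map (fun x => x.2)))) := by
    rw [pvVE, List.filter_flatMap, List.map_flatMap, pvCells, List.flatMap_assoc]
    simp only [List.flatMap_map]
  rw [hexp]
  by_cases ha1 : 1 ≤ a
  · rw [pv_flatMap_double N _ (a - 1) a (by omega) (by omega) haN
      (by intro x hx0 hxN hxs hxt; simp only [hrow]
          simp [show ¬(x + 1 = a) from by omega, hxt])]
    simp only [hrow]
    rw [pvUD]
    simp [haN, ha1, show a - 1 + 1 = a from by ring, show ¬(a - 1 = a) from by omega,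
      show ¬(a + 1 = a) from by omega]
  · rw [pv_flatMap_single N _ a ha0 haN
      (by intro x hx0 hxN hxa; simp only [hrow]
          simp [show ¬(x + 1 = a) from by omega, hxa])]
    simp only [hrow]
    rw [pvUD]
    simp [show ¬(a + 1 = a) from by omega, ha1]

-- value appended to cell (a,b) by the horizontal pass
lemma pv_HE_filter (N a b : Int) (ha0 : 0 ≤ a) (haN : a < N) (hb0 : 0 ≤ b) (hbN : b < N) :
    (((pvHE N).filter (fun p => p.1 == ((a, b) : Int × Int))).map (fun x => x.2)) = pvLR N a b := by
  have hcompute : ∀ i j : Int,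
      (((pvHG N (i, j)).filter (fun p => p.1 == ((a, b) : Int × Int))).map (fun x => x.2)) =
        (if i = a ∧ j + 1 = b ∧ b < N then [(a, b - 1)] else []) ++
        (if i = a ∧ j = b ∧ b + 1 < N then [(a, b + 1)] else []) := by
    intro i j
    simp only [pvHG]
    by_cases hjN : j + 1 < N
    · simp only [if_pos hjN, List.filter_cons, List.filter_nil, beq_iff_eq, Prod.mk.injEq]
      split_ifs <;> simp_all <;> omega
    · simp only [if_neg hjN]
      simp_all
      omega
  have hrow : ∀ i : Int, 0 ≤ i → i < N → i ≠ a → ((PySem.List.pyRange 0 N 1).flatMap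
        (fun j => (((pvHG N (i, j)).filter (fun p => p.1 == ((a, b) : Int × Int))).map (fun x => x.2)))) = [] := by
    intro i _ _ hia
    rw [List.flatMap_eq_nil_iff]
    intro x _
    rw [hcompute]
    simp [hia]
  have hexp : (((pvHE N).filter (fun p => p.1 == ((a, b) : Int × Int))).map (fun x => x.2)) =
      (PySem.List.pyRange 0 N 1).flatMap (fun i => (PySem.List.pyRange 0 N 1).flatMap
        (fun j => (((pvHG N (i, j)).filter (fun p => p.1 == ((a, b) : Int × Int))).map (fun x => x.2)))) := by
    rw [pvHE, List.filter_flatMap, List.map_flatMap, pvCells, List.flatMap_assoc]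
    simp only [List.flatMap_map]
  rw [hexp, pv_flatMap_single N _ a ha0 haN hrow]
  by_cases hb1 : 1 ≤ b
  · rw [pv_flatMap_double N _ (b - 1) b (by omega) (by omega) hbN
      (by intro x hx0 hxN hxs hxt; simp only [hcompute]
          simp [show ¬(x + 1 = b) from by omega, hxt])]
    simp only [hcompute]
    rw [pvLR]
    simp [hbN, hb1, show b - 1 + 1 = b from by ring, show ¬(b - 1 = b) from by omega,
      show ¬(b + 1 = b) from by omega]
  · rw [pv_flatMap_single N _ b hb0 hbN
      (by intro x hx0 hxN hxb; simp only [hcompute]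
          simp [show ¬(x + 1 = b) from by omega, hxb])]
    simp only [hcompute]
    rw [pvLR]
    simp [show ¬(b + 1 = b) from by omega, hb1]

-- Set.update is the identity when every element is already present
lemma pv_set_update_self {α : Type} [BEq α] [LawfulBEq α] (s : PySem.Set α) (xs : List α)
    (h : ∀ x ∈ xs, x ∈ s) : PySem.Set.update s xs = s := by
  induction xs generalizing s with
  | nil => rfl
  | cons x t ih =>
    have hx0 : x ∈ s := h x List.mem_cons_self
    have hx : PySem.Set.add s x = s := by
      simp [PySem.Set.add, hx0]
    have e : PySem.Set.update s (x :: t) = PySem.Set.update (PySem.Set.add s x) t := rfl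
    rw [e, hx]
    exact ih s (fun y hy => h y (List.mem_cons_of_mem x hy))

lemma pv_VE_keys_mem (N : Int) : ∀ p ∈ pvVE N, p.1 ∈ pvCells N := by
  intro p hp
  rw [pvVE, List.mem_flatMap] at hp
  obtain ⟨c, hc, hpc⟩ := hp
  rw [pv_mem_cells] at hc
  rw [pvVG] at hpc
  by_cases h : c.1 + 1 < N
  · rw [if_pos h] at hpc
    simp at hpc
    rcases hpc with h1 | h1 <;> subst h1 <;> rw [pv_mem_cells] <;> simp <;> omega
  · rw [if_neg h] at hpc; simp at hpc
lemma pv_HE_keys_mem (N : Int) : ∀ p ∈ pvHE N, p.1 ∈ pvCells N := by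
  intro p hp
  rw [pvHE, List.mem_flatMap] at hp
  obtain ⟨c, hc, hpc⟩ := hp
  rw [pv_mem_cells] at hc
  rw [pvHG] at hpc
  by_cases h : c.2 + 1 < N
  · rw [if_pos h] at hpc
    simp at hpc
    rcases hpc with h1 | h1 <;> subst h1 <;> rw [pv_mem_cells] <;> simp <;> omega
  · rw [if_neg h] at hpc; simp at hpc

lemma pv_items_D1 (N : Int) :
    (pvD1 N).items = (pvCells N).map (fun c => (c, ([] : List (Int × Int)))) := by
  have h := PySem.Dict.items_foldl_insert_fresh (pvCells N) (fun c => c)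
    (fun _ => ([] : List (Int × Int))) PySem.Dict.empty
    (fun a _ => PySem.Dict.contains_empty a) (by simpa using pv_cells_nodup N)
  simpa [pvD1] using h

lemma pv_keys_D1 (N : Int) : (pvD1 N).keys = pvCells N := by
  simp [PySem.Dict.keys, pv_items_D1, Function.comp_def]

lemma pv_keys_D2 (N : Int) : (pvD2 N).keys = pvCells N := by
  have h := PySem.Dict.keys_foldl_modify_key (pvVE N) (fun p => p.1)
    ([] : List (Int × Int)) (fun _ p => (fun x => x ++ [p.2])) (pvD1 N)
  rw [pvD2, h, pv_keys_D1]
  exact pv_set_update_self _ _ (by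
    intro x hx
    rw [List.mem_map] at hx
    obtain ⟨p, hp, rfl⟩ := hx
    exact pv_VE_keys_mem N p hp)

lemma pv_keys_D3 (N : Int) : (pvD3 N).keys = pvCells N := by
  have h := PySem.Dict.keys_foldl_modify_key (pvHE N) (fun p => p.1)
    ([] : List (Int × Int)) (fun _ p => (fun x => x ++ [p.2])) (pvD2 N)
  rw [pvD3, h, pv_keys_D2]
  exact pv_set_update_self _ _ (by
    intro x hx
    rw [List.mem_map] at hx
    obtain ⟨p, hp, rfl⟩ := hx
    exact pv_HE_keys_mem N p hp)

lemma pv_getD_D3 (N : Int) (c : Int × Int) (hc : c ∈ pvCells N) :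
    (pvD3 N).getD c [] = pvUD N c.1 c.2 ++ pvLR N c.1 c.2 := by
  obtain ⟨⟨ha0, haN⟩, hb0, hbN⟩ := pv_mem_cells.mp hc
  have h1 : (pvD1 N).getD c [] = [] := by
    apply PySem.Dict.getD_of_mem_items
    · rw [pv_items_D1, List.mem_map]; exact ⟨c, hc, rfl⟩
    · rw [pv_keys_D1]; exact pv_cells_nodup N
  have h2 : (pvD2 N).getD c [] = pvUD N c.1 c.2 := by
    rw [pvD2, PySem.Dict.getD_foldl_modify_append, h1]
    cases c with
    | mk a b => simpa using pv_VE_filter N a b ha0 haN hb0 hbN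
  rw [pvD3, PySem.Dict.getD_foldl_modify_append, h2]
  cases c with
  | mk a b =>
    have := pv_HE_filter N a b ha0 haN hb0 hbN
    simp only at this ⊢
    rw [this]

-- the port of A in cells-foldl form
lemma pv_A_form (N : Int) :
    build_nb4 N = ((pvCells N).foldl (fun d c => d.insert c (pvLstA N c.1 c.2))
      PySem.Dict.empty).items.map (fun p => (p.1.1, p.1.2, p.2)) := by
  rw [pv_cells_foldl]
  rfl

-- the port of B in staged form
lemma pv_B_form (N : Int) :
    build_nb4_alt N = (pvD3 N).items.map (fun p => (p.1.1, p.1.2, p.2)) := by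
  have e1 : ((PySem.List.pyRange 0 N 1).foldl (fun nb i =>
      (PySem.List.pyRange 0 N 1).foldl (fun nb j =>
        nb.insert (i, j) ([] : List (Int × Int))) nb) PySem.Dict.empty) = pvD1 N :=
    (pv_cells_foldl N (fun d c => d.insert c []) PySem.Dict.empty).symm
  have e2 : ∀ d0 : PySem.Dict (Int × Int) (List (Int × Int)),
      ((PySem.List.pyRange 0 N 1).foldl (fun nb i =>
        (PySem.List.pyRange 0 N 1).foldl (fun nb j =>
          if i + 1 < N then
            ((nb.modify (i, j) [] (· ++ [(i + 1, j)])).modify (i + 1, j) [] (· ++ [(i, j)]))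
          else nb) nb) d0) =
      (pvVE N).foldl (fun d p => d.modify p.1 [] (fun x => x ++ [p.2])) d0 := by
    intro d0
    have step : (pvCells N).foldl (fun nb (c : Int × Int) =>
        if c.1 + 1 < N then
          ((nb.modify (c.1, c.2) [] (· ++ [(c.1 + 1, c.2)])).modify (c.1 + 1, c.2) [] (· ++ [(c.1, c.2)]))
        else nb) d0 =
        (pvVE N).foldl (fun d p => d.modify p.1 [] (fun x => x ++ [p.2])) d0 := by
      rw [pvVE, pv_foldl_flatMap]
      apply PySem.List.foldl_congr_mem
      intro acc c _
      by_cases h : c.1 + 1 < N <;> simp [pvVG, h, List.foldl]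
    exact (pv_cells_foldl N _ d0).symm.trans step
  have e3 : ∀ d0 : PySem.Dict (Int × Int) (List (Int × Int)),
      ((PySem.List.pyRange 0 N 1).foldl (fun nb i =>
        (PySem.List.pyRange 0 N 1).foldl (fun nb j =>
          if j + 1 < N then
            ((nb.modify (i, j) [] (· ++ [(i, j + 1)])).modify (i, j + 1) [] (· ++ [(i, j)]))
          else nb) nb) d0) =
      (pvHE N).foldl (fun d p => d.modify p.1 [] (fun x => x ++ [p.2])) d0 := by
    intro d0
    have step : (pvCells N).foldl (fun nb (c : Int × Int) =>
        if c.2 + 1 < N then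
          ((nb.modify (c.1, c.2) [] (· ++ [(c.1, c.2 + 1)])).modify (c.1, c.2 + 1) [] (· ++ [(c.1, c.2)]))
        else nb) d0 =
        (pvHE N).foldl (fun d p => d.modify p.1 [] (fun x => x ++ [p.2])) d0 := by
      rw [pvHE, pv_foldl_flatMap]
      apply PySem.List.foldl_congr_mem
      intro acc c _
      by_cases h : c.2 + 1 < N <;> simp [pvHG, h, List.foldl]
    exact (pv_cells_foldl N _ d0).symm.trans step
  show ((PySem.List.pyRange 0 N 1).foldl _ ((PySem.List.pyRange 0 N 1).foldl _
      ((PySem.List.pyRange 0 N 1).foldl _ PySem.Dict.empty))).items.map _ = _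
  rw [e1, e2, e3, pvD3, pvD2]

-- ===== VERDICT (by name: the statement is the Claim_ definition above) =====
theorem build_nb4_spec : Claim_equal_build_nb4 := by
  intro N _hD
  unfold Spec_build_nb4
  rw [pv_A_form, pv_B_form]
  rw [PySem.Dict.items_foldl_insert_fresh (pvCells N) (fun c => c)
    (fun c => pvLstA N c.1 c.2) PySem.Dict.empty
    (fun a _ => PySem.Dict.contains_empty a) (by simpa using pv_cells_nodup N)]
  rw [PySem.Dict.items_eq_map_keys (pvD3 N) (by rw [pv_keys_D3]; exact pv_cells_nodup N) []]
  rw [pv_keys_D3]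
  have hemp : (PySem.Dict.empty : PySem.Dict (Int × Int) (List (Int × Int))).items = [] := rfl
  simp only [hemp, List.nil_append, List.map_map]
  apply List.map_congr_left
  intro c hc
  obtain ⟨⟨ha0, haN⟩, hb0, hbN⟩ := pv_mem_cells.mp hc
  simp only [Function.comp]
  rw [pv_getD_D3 N c hc, pv_lstA_eq N c.1 c.2 ha0 haN hb0 hbN]
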